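-- pv_equiv track=rewrite | github.com/MKarbow/Algortym-Little-a | krok2.py | get_edge_max_opt_exl_cost
-- ===== SOURCE A (Python) =====
-- from typing import List, Tuple
--
-- Inf = float('inf')
--
-- def get_edge_max_opt_exl_cost(mtx: List[List[int]]) -> Tuple[int, int]:
--     """
--     Funkcja zwracjąca indeksy krawędzi o maksymalnym optymalnym koszcie wyłączenia
--     do algorytmu Little'a do rozwiązania problemu TSP
--     :param mtx: (List[List[int]]) : Macierz kosztów przejścia
--     :return: (Tuple[int, int]) : Krotka indeksów i*, j*
--     """
--     i_star = -1  # indeks i* wynikowej krawędzi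
--     j_star = -1  # indeks j* wynikowej krawędzi
--     d_max = -1  # największy koszt wyłączenia odcinka
--     for i, row in enumerate(mtx):
--         for j, val in enumerate(row):
--             if val == 0:  # dla każdej wartości równej 0
--                 min_row = Inf
--                 min_col = Inf
--                 for i_, row_ in enumerate(mtx):
--                     for j_, val_ in enumerate(row_):
--                         if i_ != i or j_ != j:  # pomija się indeksy elementu zerowego
--                             if i_ == i:
--                                 if val_ < min_row:
--                                     min_row = val_
--                             if j_ == j:
--                                 if val_ < min_col:
--                                     min_col = val_
--                 d = min_row + min_col  # wyznacza się koszt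
--                 if d > d_max:  # aktualizuje się największy koszt wyłączenia i indeksy krawędzi
--                     d_max = d
--                     i_star = i
--                     j_star = j
--     return i_star, j_star
-- ===== SOURCE B (Python) =====
-- from typing import List, Tuple
--
-- Inf = float('inf')
--
-- def get_edge_max_opt_exl_cost(mtx: List[List[int]]) -> Tuple[int, int]:
--     """Same result as the original, but precomputes the two smallest entries of
--     every row and every column once, so each zero cell costs O(1) instead of a
--     full matrix scan."""
--     def two_smallest(pairs):
--         m1, k1, m2 = Inf, -1, Inf
--         for k, v in pairs:
--             if v < m1:
--                 m2 = m1
--                 m1 = v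
--                 k1 = k
--             elif v < m2:
--                 m2 = v
--         return m1, k1, m2
--
--     def sel(stats, k):
--         m1, k1, m2 = stats
--         return m2 if k1 == k else m1
--
--     row_stats = [two_smallest(enumerate(row)) for row in mtx]
--     maxw = 0
--     for row in mtx:
--         maxw = max(maxw, len(row))
--     col_stats = [two_smallest((i, row[j]) for i, row in enumerate(mtx) if j < len(row))
--                  for j in range(maxw)]
--
--     i_star, j_star, d_max = -1, -1, -1
--     for i, row in enumerate(mtx):
--         for j, v in enumerate(row):
--             if v == 0:
--                 d = sel(row_stats[i], j) + sel(col_stats[j], i)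
--                 if d > d_max:
--                     d_max, i_star, j_star = d, i, j
--     return i_star, j_star
-- ===== Notes on version B (the rewrite author's own statement) =====
-- stated objective: faster
-- what changed: Instead of rescanning the whole matrix for every zero cell (O(n^2) per zero), B precomputes the two smallest entries (with the argmin index) of every row and every column once and answers each zero cell's exclusion cost in O(1).
import Mathlib
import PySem

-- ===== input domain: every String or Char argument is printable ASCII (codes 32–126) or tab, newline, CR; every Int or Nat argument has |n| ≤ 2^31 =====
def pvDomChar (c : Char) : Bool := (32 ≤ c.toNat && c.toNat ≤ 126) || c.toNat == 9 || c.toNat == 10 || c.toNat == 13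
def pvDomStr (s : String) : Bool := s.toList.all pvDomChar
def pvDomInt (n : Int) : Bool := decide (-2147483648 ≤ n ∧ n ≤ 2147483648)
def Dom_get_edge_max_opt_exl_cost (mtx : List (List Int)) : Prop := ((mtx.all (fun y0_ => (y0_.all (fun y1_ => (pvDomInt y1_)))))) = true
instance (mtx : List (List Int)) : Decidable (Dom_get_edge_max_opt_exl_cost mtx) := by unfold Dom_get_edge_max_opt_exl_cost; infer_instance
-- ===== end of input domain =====

-- B precomputes the two smallest entries (with the argmin index) of every row and column once,
-- then answers each zero cell's row-min+col-min exclusion cost in O(1) instead of rescanning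
-- the whole matrix per zero cell (objective: faster).

-- ===== PORT A =====
-- Python's float('inf') appears only as the initial value of min_row/min_col and in d;
-- it is modelled exactly by Option Int with `none` = +inf (no other float ever arises).
def oLT (v : Int) (m : Option Int) : Bool :=      -- v < m  (m possibly +inf)
  match m with
  | none => true
  | some a => decide (v < a)

def eAdd (a b : Option Int) : Option Int :=       -- a + b with +inf absorption
  match a, b with
  | some x, some y => some (x + y)
  | _, _ => none

def eGT (d dm : Option Int) : Bool :=             -- d > dm  (either possibly +inf)
  match d, dm with
  | some x, some y => decide (y < x)
  | none, some _ => true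
  | _, none => false

def get_edge_max_opt_exl_cost (mtx : List (List Int)) : Int × Int :=
  let r := (PySem.List.enumerate mtx 0).foldl (fun (acc : Int × Int × Option Int) irow =>
    (PySem.List.enumerate irow.2 0).foldl (fun acc jval =>
      if jval.2 = 0 then
        let mrc := (PySem.List.enumerate mtx 0).foldl (fun (mrc : Option Int × Option Int) irow_ =>
          (PySem.List.enumerate irow_.2 0).foldl (fun mrc jval_ =>
            if irow_.1 ≠ irow.1 ∨ jval_.1 ≠ jval.1 then
              let mrc := if irow_.1 = irow.1 then
                           (if oLT jval_.2 mrc.1 then (some jval_.2, mrc.2) else mrc)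
                         else mrc
              let mrc := if jval_.1 = jval.1 then
                           (if oLT jval_.2 mrc.2 then (mrc.1, some jval_.2) else mrc)
                         else mrc
              mrc
            else mrc) mrc) ((none : Option Int), (none : Option Int))
        let d := eAdd mrc.1 mrc.2
        if eGT d acc.2.2 then (irow.1, jval.1, d) else acc
      else acc) acc) ((-1 : Int), (-1 : Int), (some (-1) : Option Int))
  (r.1, r.2.1)

-- ===== PORT B =====
-- state of two_smallest: (m1, k1, m2) = smallest value, its index, second-smallest value
def tsStep (s : Option Int × Int × Option Int) (p : Int × Int) : Option Int × Int × Option Int :=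
  if oLT p.2 s.1 then (some p.2, p.1, s.1)
  else if oLT p.2 s.2.2 then (s.1, s.2.1, some p.2)
  else s

def twoSmallest (l : List (Int × Int)) : Option Int × Int × Option Int :=
  l.foldl tsStep (none, -1, none)

def sel (s : Option Int × Int × Option Int) (k : Int) : Option Int :=
  if s.2.1 = k then s.2.2 else s.1

def get_edge_max_opt_exl_cost_alt (mtx : List (List Int)) : Int × Int :=
  let row_stats := mtx.map (fun row => twoSmallest (PySem.List.enumerate row 0))
  let maxw := mtx.foldl (fun m row => max m (row.length : Int)) 0
  let col_stats := (PySem.List.pyRange 0 maxw 1).map (fun j =>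
    twoSmallest ((PySem.List.enumerate mtx 0).filterMap (fun p =>
      (PySem.List.pyGet? p.2 j).map (fun v => (p.1, v)))))
  let r := (PySem.List.enumerate mtx 0).foldl (fun (acc : Int × Int × Option Int) irow =>
    (PySem.List.enumerate irow.2 0).foldl (fun acc jval =>
      if jval.2 = 0 then
        let d := eAdd (sel (PySem.List.pyGetD row_stats irow.1 (none, -1, none)) jval.1)
                      (sel (PySem.List.pyGetD col_stats jval.1 (none, -1, none)) irow.1)
        if eGT d acc.2.2 then (irow.1, jval.1, d) else acc
      else acc) acc) ((-1 : Int), (-1 : Int), (some (-1) : Option Int))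
  (r.1, r.2.1)

-- ===== PRECONDITION & SPEC =====
def Spec_get_edge_max_opt_exl_cost (mtx : List (List Int)) (out : Int × Int) : Prop := out = get_edge_max_opt_exl_cost_alt mtx
instance (mtx : List (List Int)) (out : Int × Int) : Decidable (Spec_get_edge_max_opt_exl_cost mtx out) := by unfold Spec_get_edge_max_opt_exl_cost; infer_instance

-- ===== CLAIM (what is proved, stated in full; the proofs are below) =====
def Claim_equal_get_edge_max_opt_exl_cost : Prop := ∀ (mtx : List (List Int)), Dom_get_edge_max_opt_exl_cost mtx → Spec_get_edge_max_opt_exl_cost mtx (get_edge_max_opt_exl_cost mtx)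

-- ===== LEMMAS AND PROOFS =====

-- extended-min machinery: Option Int with none = +inf
def omin (m : Option Int) (v : Int) : Option Int := if oLT v m then some v else m

def ole (a b : Option Int) : Prop :=
  match a, b with
  | _, none => True
  | none, some _ => False
  | some x, some y => x ≤ y

-- min of all values of l whose key differs from k (none = +inf when there are none)
def minExcl (l : List (Int × Int)) (k : Int) : Option Int :=
  l.foldl (fun m p => if p.1 = k then m else omin m p.2) none

-- min of all values of l
def eMin (l : List (Int × Int)) : Option Int := l.foldl (fun m p => omin m p.2) none

-- the (row-index, value) pairs of column j
def colPairs (mtx : List (List Int)) (j : Int) : List (Int × Int) :=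
  (PySem.List.enumerate mtx 0).filterMap (fun p =>
    (PySem.List.pyGet? p.2 j).map (fun v => (p.1, v)))

theorem ole_refl (a : Option Int) : ole a a := by cases a <;> simp [ole]

theorem ole_trans {a b c : Option Int} (h1 : ole a b) (h2 : ole b c) : ole a c := by
  cases a <;> cases b <;> cases c <;> simp_all [ole] <;> omega

theorem ole_antisymm {a b : Option Int} (h1 : ole a b) (h2 : ole b a) : a = b := by
  cases a <;> cases b <;> simp_all [ole] <;> omega

theorem omin_le (m : Option Int) (v : Int) : ole (omin m v) m := by
  cases m with
  | none => simp [omin, oLT, ole]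
  | some a => by_cases h : v < a <;> simp [omin, oLT, ole, h] <;> omega

theorem omin_le_val (m : Option Int) (v : Int) : ole (omin m v) (some v) := by
  cases m with
  | none => simp [omin, oLT, ole]
  | some a => by_cases h : v < a <;> simp [omin, oLT, ole, h] <;> omega

theorem omin_mono {m m' : Option Int} (v : Int) (h : ole m m') : ole (omin m v) (omin m' v) := by
  cases m with
  | none =>
    cases m' with
    | none => exact ole_refl _
    | some b => simp [ole] at h
  | some a =>
    cases m' with
    | none => by_cases h1 : v < a <;> simp [omin, oLT, ole, h1] <;> omega
    | some b =>
      simp [ole] at h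
      by_cases h1 : v < a <;> by_cases h2 : v < b <;>
        simp [omin, oLT, ole, h1, h2] <;> omega

theorem oLT_of_lt_ole {m : Option Int} {x v : Int} (h : ole (some x) m) (hv : v < x) :
    oLT v m = true := by
  cases m <;> simp_all [ole, oLT] <;> omega

-- fold of the minExcl step only decreases the accumulator
theorem foldl_minExcl_le_init (l : List (Int × Int)) (k : Int) (m : Option Int) :
    ole (l.foldl (fun m p => if p.1 = k then m else omin m p.2) m) m := by
  induction l generalizing m with
  | nil => exact ole_refl m
  | cons p t ih =>
    simp only [List.foldl_cons]
    split
    · exact ih m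
    · exact ole_trans (ih _) (omin_le m p.2)

-- unfiltered min is below the filtered min
theorem eMin_ole_minExcl (l : List (Int × Int)) (k : Int) : ole (eMin l) (minExcl l k) := by
  unfold eMin minExcl
  have main : ∀ (l : List (Int × Int)) (m m' : Option Int), ole m m' →
      ole (l.foldl (fun m p => omin m p.2) m)
          (l.foldl (fun m p => if p.1 = k then m else omin m p.2) m') := by
    intro l
    induction l with
    | nil => intro m m' h; exact h
    | cons p t ih =>
      intro m m' h
      simp only [List.foldl_cons]
      split
      · exact ih _ _ (ole_trans (omin_le m p.2) h)
      · exact ih _ _ (omin_mono p.2 h)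
  exact main l none none trivial

theorem minExcl_of_not_mem (l : List (Int × Int)) (k : Int) (h : ∀ p ∈ l, p.1 ≠ k) :
    minExcl l k = eMin l := by
  unfold minExcl eMin
  exact PySem.List.foldl_congr_mem l _ _ none (by
    intro acc p hp
    simp [h p hp])

theorem minExcl_le_mem {l : List (Int × Int)} {k1 x : Int} (hmem : (k1, x) ∈ l) (k : Int)
    (hne : k1 ≠ k) : ole (minExcl l k) (some x) := by
  obtain ⟨s, t, rfl⟩ := List.append_of_mem hmem
  unfold minExcl
  rw [List.foldl_append, List.foldl_cons]
  simp only [hne, if_neg]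
  refine ole_trans (foldl_minExcl_le_init t k _) ?_
  simpa using omin_le_val _ x

theorem eMin_eq_none_iff (l : List (Int × Int)) : eMin l = none ↔ l = [] := by
  constructor
  · intro h
    cases l with
    | nil => rfl
    | cons p t =>
      exfalso
      have aux : ∀ (t : List (Int × Int)) (x : Int),
          ∃ y, (t.foldl (fun m p => omin m p.2) (some x)) = some y := by
        intro t
        induction t with
        | nil => intro x; exact ⟨x, rfl⟩
        | cons q t ih =>
          intro x
          simp only [List.foldl_cons]
          by_cases hq : oLT q.2 (some x) = true
          · simpa [omin, hq] using ih q.2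
          · simpa [omin, hq] using ih x
      have : eMin (p :: t) = t.foldl (fun m p => omin m p.2) (some p.2) := by
        simp [eMin, omin, oLT]
      obtain ⟨y, hy⟩ := aux t p.2
      rw [this, hy] at h
      simp at h
  · rintro rfl; rfl

theorem minExcl_append_single (l : List (Int × Int)) (p : Int × Int) (k : Int) :
    minExcl (l ++ [p]) k = if p.1 = k then minExcl l k else omin (minExcl l k) p.2 := by
  simp [minExcl, List.foldl_append]

-- a key that is fresh for l and different from k1
theorem exists_fresh (l : List (Int × Int)) (k1 : Int) :
    ∃ k, (∀ p ∈ l, p.1 ≠ k) ∧ k1 ≠ k := by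
  refine ⟨((l.map Prod.fst).foldl max k1) + 1, ?_, ?_⟩
  · intro p hp
    have := (PySem.List.le_foldl_max (l.map Prod.fst) k1).2 p.1 (List.mem_map_of_mem hp)
    omega
  · have := (PySem.List.le_foldl_max (l.map Prod.fst) k1).1
    omega

theorem ts_spec (l : List (Int × Int)) (hnd : (l.map Prod.fst).Nodup) :
    (∀ k, sel (twoSmallest l) k = minExcl l k) ∧
    (∀ x, (twoSmallest l).1 = some x → ((twoSmallest l).2.1, x) ∈ l) := by
  induction l using List.reverseRecOn with
  | nil =>
    constructor
    · intro k
      by_cases hk : (-1 : Int) = k <;> simp [twoSmallest, sel, minExcl, hk]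
    · intro x hx; simp [twoSmallest] at hx
  | append_singleton l p ih =>
    rw [List.map_append] at hnd
    have hnd1 : (l.map Prod.fst).Nodup := hnd.of_append_left
    have hfresh : p.1 ∉ l.map Prod.fst := by
      intro hmem
      exact (List.disjoint_of_nodup_append hnd) hmem (by simp)
    obtain ⟨IH1, IH2⟩ := ih hnd1
    have hts : twoSmallest (l ++ [p]) = tsStep (twoSmallest l) p := by
      simp [twoSmallest, List.foldl_append]
    cases hm1 : (twoSmallest l).1 with
    | none =>
      have hnil : l = [] := by
        obtain ⟨k, hk, hk1⟩ := exists_fresh l (twoSmallest l).2.1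
        have h := IH1 k
        rw [minExcl_of_not_mem l k hk] at h
        simp [sel, hk1, hm1] at h
        exact (eMin_eq_none_iff l).1 h.symm
      subst hnil
      constructor
      · intro k
        by_cases hk : p.1 = k <;>
          simp [hts, twoSmallest, tsStep, sel, minExcl, omin, oLT, hk]
      · intro x hx
        simp [twoSmallest, tsStep, oLT] at hx
        subst hx
        simp [twoSmallest, tsStep, sel, oLT]
    | some x1 =>
      have hk1mem : ((twoSmallest l).2.1, x1) ∈ l := IH2 x1 hm1
      have hkeys : (twoSmallest l).2.1 ∈ l.map Prod.fst := by
        exact List.mem_map_of_mem hk1mem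
      have hp_ne_k1 : p.1 ≠ (twoSmallest l).2.1 := fun h => hfresh (h ▸ hkeys)
      have hm1_eMin : eMin l = some x1 := by
        obtain ⟨k, hk, hk1⟩ := exists_fresh l (twoSmallest l).2.1
        have h := IH1 k
        rw [minExcl_of_not_mem l k hk] at h
        simpa [sel, hk1, hm1] using h.symm
      have hm2_def : (twoSmallest l).2.2 = minExcl l (twoSmallest l).2.1 := by
        simpa [sel] using IH1 (twoSmallest l).2.1
      have hole_minExcl : ∀ k, ole (some x1) (minExcl l k) := by
        intro k
        have := eMin_ole_minExcl l k
        rwa [hm1_eMin] at this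
      have hm2_ge : ole (some x1) (twoSmallest l).2.2 := by
        rw [hm2_def]; exact hole_minExcl _
      have hminExcl_eq : ∀ k, k ≠ (twoSmallest l).2.1 → minExcl l k = some x1 := by
        intro k hk
        exact ole_antisymm (minExcl_le_mem hk1mem k (fun h => hk h.symm)) (hole_minExcl k)
      rw [hts]
      by_cases hc1 : oLT p.2 (twoSmallest l).1 = true
      · have hlt : p.2 < x1 := by rw [hm1] at hc1; simpa [oLT] using hc1
        have hnew : tsStep (twoSmallest l) p = (some p.2, p.1, twoSmallest l |>.1) := by
          simp [tsStep, hc1]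
        rw [hnew]
        constructor
        · intro k
          rw [minExcl_append_single]
          by_cases hk : p.1 = k
          · simp [sel, hk, hm1, hminExcl_eq k (hk ▸ hp_ne_k1)]
          · have : oLT p.2 (minExcl l k) = true := oLT_of_lt_ole (hole_minExcl k) hlt
            simp [sel, hk, omin, this]
        · intro x hx
          simp at hx
          subst hx
          simp
      · by_cases hc2 : oLT p.2 (twoSmallest l).2.2 = true
        · have hge : x1 ≤ p.2 := by
            rw [hm1] at hc1; simpa [oLT] using hc1
          have hnew : tsStep (twoSmallest l) p
              = ((twoSmallest l).1, (twoSmallest l).2.1, some p.2) := by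
            simp [tsStep, hc1, hc2]
          rw [hnew]
          constructor
          · intro k
            rw [minExcl_append_single]
            by_cases hk1k : (twoSmallest l).2.1 = k
            · have hpk : p.1 ≠ k := hk1k ▸ hp_ne_k1
              rw [if_neg hpk, ← hk1k, ← hm2_def]
              simp [sel, omin, hc2]
            · by_cases hpk : p.1 = k
              · simp [sel, hk1k, hpk, hm1,
                  hminExcl_eq k (fun h => hk1k h.symm)]
              · have : oLT p.2 (some x1) = false := by simp [oLT]; omega
                simp [sel, hk1k, hpk, hm1, hminExcl_eq k (fun h => hk1k h.symm), omin, this]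
          · intro x hx
            simp [hm1] at hx
            subst hx
            exact List.mem_append_left _ hk1mem
        · have hge : x1 ≤ p.2 := by
            rw [hm1] at hc1; simpa [oLT] using hc1
          have hnew : tsStep (twoSmallest l) p = twoSmallest l := by
            simp [tsStep, hc1, hc2]
          rw [hnew]
          constructor
          · intro k
            rw [minExcl_append_single]
            by_cases hk1k : (twoSmallest l).2.1 = k
            · have hpk : p.1 ≠ k := hk1k ▸ hp_ne_k1
              rw [if_neg hpk, ← hk1k, ← hm2_def]
              simp [sel, omin, hc2]
            · by_cases hpk : p.1 = k
              · simp [sel, hk1k, hpk, hm1, hminExcl_eq k (fun h => hk1k h.symm)]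
              · have : oLT p.2 (some x1) = false := by simp [oLT]; omega
                simp [sel, hk1k, hpk, hm1, hminExcl_eq k (fun h => hk1k h.symm), omin, this]
          · intro x hx
            exact List.mem_append_left _ (IH2 x hx)

-- == A-side characterisation of the inner double loop ==

theorem foldl_pair_split {α β γ : Type} (l : List α) (F : β → α → β) (G : γ → α → γ)
    (a : β) (b : γ) :
    l.foldl (fun s x => (F s.1 x, G s.2 x)) (a, b) = (l.foldl F a, l.foldl G b) := by
  induction l generalizing a b with
  | nil => rfl
  | cons x t ih => simp [List.foldl_cons, ih]

def rowF (i j i_ : Int) (m : Option Int) (jv : Int × Int) : Option Int :=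
  if i_ = i ∧ jv.1 ≠ j then omin m jv.2 else m

def colF (i j i_ : Int) (m : Option Int) (jv : Int × Int) : Option Int :=
  if jv.1 = j ∧ i_ ≠ i then omin m jv.2 else m

theorem step_split (i j i_ : Int) (mrc : Option Int × Option Int) (jv : Int × Int) :
    (if i_ ≠ i ∨ jv.1 ≠ j then
       let mrc := if i_ = i then (if oLT jv.2 mrc.1 then (some jv.2, mrc.2) else mrc) else mrc
       let mrc := if jv.1 = j then (if oLT jv.2 mrc.2 then (mrc.1, some jv.2) else mrc) else mrc
       mrc
     else mrc)
    = (rowF i j i_ mrc.1 jv, colF i j i_ mrc.2 jv) := by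
  by_cases h1 : i_ = i <;> by_cases h2 : jv.1 = j <;>
    simp [rowF, colF, omin, h1, h2] <;> split_ifs <;> simp_all

theorem rowF_id (i j i_ : Int) (h : i_ ≠ i) (l : List (Int × Int)) (m : Option Int) :
    l.foldl (rowF i j i_) m = m := by
  induction l generalizing m with
  | nil => rfl
  | cons p t ih => simp [List.foldl_cons, rowF, h, ih]

theorem rowF_at (i j : Int) (l : List (Int × Int)) (m : Option Int) :
    l.foldl (rowF i j i) m = l.foldl (fun m p => if p.1 = j then m else omin m p.2) m := by
  apply PySem.List.foldl_congr_mem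
  intro acc p _
  by_cases h : p.1 = j <;> simp [rowF, h]

theorem colF_skip (i j i_ : Int) (l : List (Int × Int)) (h : ∀ p ∈ l, p.1 ≠ j)
    (m : Option Int) : l.foldl (colF i j i_) m = m := by
  rw [PySem.List.foldl_congr_mem l _ (fun m _ => m) m
    (by intro acc p hp; simp [colF, h p hp])]
  exact List.foldl_fixed _

theorem fst_of_mem_enum {α : Type} (l : List α) (s : Int) (p : Int × α)
    (hp : p ∈ PySem.List.enumerate l s) : ∃ k : Nat, k < l.length ∧ p.1 = s + k := by
  obtain ⟨k, h, hpe⟩ := (PySem.List.mem_enumerate_iff l s p).1 hp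
  exact ⟨k, h, by rw [hpe]⟩

theorem outer_skip (i j : Int) (l : List (List Int)) (s : Int)
    (h : ∀ p ∈ PySem.List.enumerate l s, p.1 ≠ i) (m : Option Int) :
    (PySem.List.enumerate l s).foldl
      (fun m ir => (PySem.List.enumerate ir.2 0).foldl (rowF i j ir.1) m) m = m := by
  rw [PySem.List.foldl_congr_mem _ _ (fun m _ => m) m
    (fun acc x hx => rowF_id i j x.1 (h x hx) _ acc)]
  exact List.foldl_fixed _

theorem row_component (i j : Int) (l1 l2 : List (List Int)) (row : List Int)
    (hi : i = (l1.length : Int)) :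
    (PySem.List.enumerate (l1 ++ row :: l2) 0).foldl
      (fun m ir => (PySem.List.enumerate ir.2 0).foldl (rowF i j ir.1) m) none
    = minExcl (PySem.List.enumerate row 0) j := by
  rw [PySem.List.enumerate_append, PySem.List.enumerate_cons, List.foldl_append, List.foldl_cons]
  have hpre : (PySem.List.enumerate l1 0).foldl
      (fun m ir => (PySem.List.enumerate ir.2 0).foldl (rowF i j ir.1) m) none = none := by
    apply outer_skip
    intro p hp
    obtain ⟨k, hk, hpk⟩ := fst_of_mem_enum l1 0 p hp
    omega
  rw [hpre]
  have hidx : (0 + (l1.length : Int)) = i := by omega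
  rw [hidx]
  have hmid : (PySem.List.enumerate row 0).foldl (rowF i j i) none
      = minExcl (PySem.List.enumerate row 0) j := by
    rw [rowF_at]; rfl
  rw [hmid]
  apply outer_skip
  intro p hp
  obtain ⟨k, hk, hpk⟩ := fst_of_mem_enum l2 (i + 1) p hp
  omega

theorem colF_row (i j : Int) (hj : 0 ≤ j) (row_ : List Int) (i_ : Int) (m : Option Int) :
    (PySem.List.enumerate row_ 0).foldl (colF i j i_) m
    = match (PySem.List.pyGet? row_ j).map (fun v => (i_, v)) with
      | some q => if q.1 = i then m else omin m q.2
      | none => m := by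
  by_cases hlt : j.toNat < row_.length
  · have h2 : j < (row_.length : Int) := by omega
    have hget : PySem.List.pyGet? row_ j = some row_[j.toNat] := by
      simp [PySem.List.pyGet?, PySem.List.pyIdx?, hj, h2]
    rw [hget]
    conv_lhs => rw [← List.take_append_drop j.toNat row_, List.drop_eq_getElem_cons hlt]
    rw [PySem.List.enumerate_append, PySem.List.enumerate_cons, List.foldl_append,
      List.foldl_cons]
    have hpre : (PySem.List.enumerate (row_.take j.toNat) 0).foldl (colF i j i_) m = m := by
      apply colF_skip
      intro p hp
      obtain ⟨k, hk, hpk⟩ := fst_of_mem_enum _ 0 p hp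
      rw [List.length_take] at hk
      omega
    rw [hpre]
    have hidx : (0 + ((row_.take j.toNat).length : Int)) = j := by
      rw [List.length_take]; omega
    rw [hidx]
    have hpost : ∀ m', (PySem.List.enumerate (row_.drop (j.toNat + 1)) (j + 1)).foldl
        (colF i j i_) m' = m' := by
      intro m'
      apply colF_skip
      intro p hp
      obtain ⟨k, hk, hpk⟩ := fst_of_mem_enum _ (j + 1) p hp
      omega
    rw [hpost]
    by_cases hI : i_ = i <;> simp [colF, hI]
  · have h2 : ¬ j < (row_.length : Int) := by omega
    have hget : PySem.List.pyGet? row_ j = none := by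
      simp [PySem.List.pyGet?, PySem.List.pyIdx?, hj, h2]
    rw [hget]
    apply colF_skip
    intro p hp
    obtain ⟨k, hk, hpk⟩ := fst_of_mem_enum _ 0 p hp
    omega

theorem col_component (i j : Int) (hj : 0 ≤ j) (mtx : List (List Int)) :
    (PySem.List.enumerate mtx 0).foldl
      (fun m ir => (PySem.List.enumerate ir.2 0).foldl (colF i j ir.1) m) none
    = minExcl (colPairs mtx j) i := by
  unfold minExcl colPairs
  rw [List.foldl_filterMap]
  apply PySem.List.foldl_congr_mem
  intro acc ir _
  rw [colF_row i j hj ir.2 ir.1 acc]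
  cases PySem.List.pyGet? ir.2 j <;> rfl

theorem inner_eq (mtx : List (List Int)) (i j : Int) (hj : 0 ≤ j)
    (l1 l2 : List (List Int)) (row : List Int)
    (hmtx : mtx = l1 ++ row :: l2) (hi : i = (l1.length : Int)) :
    ((PySem.List.enumerate mtx 0).foldl (fun (mrc : Option Int × Option Int) irow_ =>
          (PySem.List.enumerate irow_.2 0).foldl (fun mrc jval_ =>
            if irow_.1 ≠ i ∨ jval_.1 ≠ j then
              let mrc := if irow_.1 = i then
                           (if oLT jval_.2 mrc.1 then (some jval_.2, mrc.2) else mrc)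
                         else mrc
              let mrc := if jval_.1 = j then
                           (if oLT jval_.2 mrc.2 then (mrc.1, some jval_.2) else mrc)
                         else mrc
              mrc
            else mrc) mrc) ((none : Option Int), (none : Option Int)))
    = (minExcl (PySem.List.enumerate row 0) j, minExcl (colPairs mtx j) i) := by
  have h1 : ∀ (irow_ : Int × List Int) (mrc : Option Int × Option Int),
      (PySem.List.enumerate irow_.2 0).foldl (fun mrc jval_ =>
        if irow_.1 ≠ i ∨ jval_.1 ≠ j then
          let mrc := if irow_.1 = i then
                       (if oLT jval_.2 mrc.1 then (some jval_.2, mrc.2) else mrc)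
                     else mrc
          let mrc := if jval_.1 = j then
                       (if oLT jval_.2 mrc.2 then (mrc.1, some jval_.2) else mrc)
                     else mrc
          mrc
        else mrc) mrc
      = ((PySem.List.enumerate irow_.2 0).foldl (rowF i j irow_.1) mrc.1,
         (PySem.List.enumerate irow_.2 0).foldl (colF i j irow_.1) mrc.2) := by
    intro irow_ mrc
    rw [← foldl_pair_split (PySem.List.enumerate irow_.2 0) (rowF i j irow_.1)
      (colF i j irow_.1) mrc.1 mrc.2, Prod.mk.eta]
    exact PySem.List.foldl_congr_mem _ _ _ mrc (fun acc x _ => step_split i j irow_.1 acc x)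
  calc (PySem.List.enumerate mtx 0).foldl (fun (mrc : Option Int × Option Int) irow_ =>
          (PySem.List.enumerate irow_.2 0).foldl (fun mrc jval_ =>
            if irow_.1 ≠ i ∨ jval_.1 ≠ j then
              let mrc := if irow_.1 = i then
                           (if oLT jval_.2 mrc.1 then (some jval_.2, mrc.2) else mrc)
                         else mrc
              let mrc := if jval_.1 = j then
                           (if oLT jval_.2 mrc.2 then (mrc.1, some jval_.2) else mrc)
                         else mrc
              mrc
            else mrc) mrc) ((none : Option Int), (none : Option Int))
      = (PySem.List.enumerate mtx 0).foldl (fun mrc irow_ =>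
          ((PySem.List.enumerate irow_.2 0).foldl (rowF i j irow_.1) mrc.1,
           (PySem.List.enumerate irow_.2 0).foldl (colF i j irow_.1) mrc.2))
          ((none : Option Int), (none : Option Int)) :=
        PySem.List.foldl_congr_mem _ _ _ _ (fun acc x _ => h1 x acc)
    _ = ((PySem.List.enumerate mtx 0).foldl
            (fun m ir => (PySem.List.enumerate ir.2 0).foldl (rowF i j ir.1) m) none,
         (PySem.List.enumerate mtx 0).foldl
            (fun m ir => (PySem.List.enumerate ir.2 0).foldl (colF i j ir.1) m) none) :=
        foldl_pair_split (PySem.List.enumerate mtx 0)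
          (fun m ir => (PySem.List.enumerate ir.2 0).foldl (rowF i j ir.1) m)
          (fun m ir => (PySem.List.enumerate ir.2 0).foldl (colF i j ir.1) m) none none
    _ = (minExcl (PySem.List.enumerate row 0) j, minExcl (colPairs mtx j) i) := by
        rw [hmtx]
        exact congrArg₂ Prod.mk (row_component i j l1 l2 row hi)
          (col_component i j hj (l1 ++ row :: l2))

-- == lookup lemmas for B's precomputed tables ==

theorem nodup_keys_enum {α : Type} (xs : List α) :
    ((PySem.List.enumerate xs 0).map Prod.fst).Nodup := by
  rw [PySem.List.map_fst_enumerate]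
  exact PySem.List.nodup_pyRange_one _ _

theorem nodup_keys_colPairs (mtx : List (List Int)) (j : Int) :
    ((colPairs mtx j).map Prod.fst).Nodup := by
  have hsub : ∀ (l : List (Int × List Int)),
      ((l.filterMap (fun p => (PySem.List.pyGet? p.2 j).map (fun v => (p.1, v)))).map
        Prod.fst).Sublist (l.map Prod.fst) := by
    intro l
    induction l with
    | nil => simp
    | cons p t ih =>
      rw [List.filterMap_cons]
      cases h : (PySem.List.pyGet? p.2 j).map (fun v => (p.1, v)) with
      | none => simpa using ih.trans (List.sublist_cons_self _ _)
      | some q =>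
        have hq : q.1 = p.1 := by
          cases hv : PySem.List.pyGet? p.2 j <;> rw [hv] at h <;> simp at h
          rw [← h]
        simp only [List.map_cons, hq]
        exact ih.cons₂ _
  exact List.Nodup.sublist (hsub _) (nodup_keys_enum mtx)

theorem pyGetD_map_nat {α β : Type} (xs : List α) (f : α → β) (k : Nat)
    (hk : k < xs.length) (d : β) :
    PySem.List.pyGetD (xs.map f) (k : Int) d = f xs[k] := by
  rw [PySem.List.pyGetD_eq_getElem _ d (by omega) (by simp; omega)]
  simp

theorem len_le_maxw (mtx : List (List Int)) (row : List Int) (h : row ∈ mtx) :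
    (row.length : Int) ≤ mtx.foldl (fun m row => max m (row.length : Int)) 0 := by
  have heq : mtx.foldl (fun m row => max m (row.length : Int)) 0
      = (mtx.map (fun r => (r.length : Int))).foldl max 0 := by
    rw [List.foldl_map]
  rw [heq]
  exact (PySem.List.le_foldl_max _ 0).2 _ (List.mem_map_of_mem h)

-- == the two loop bodies agree cell by cell ==

theorem step2_eq (mtx : List (List Int)) (irow : Int × List Int) (jval : Int × Int)
    (hirow : irow ∈ PySem.List.enumerate mtx 0)
    (hjval : jval ∈ PySem.List.enumerate irow.2 0) (acc : Int × Int × Option Int) :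
    (if jval.2 = 0 then
        let mrc := (PySem.List.enumerate mtx 0).foldl (fun (mrc : Option Int × Option Int) irow_ =>
          (PySem.List.enumerate irow_.2 0).foldl (fun mrc jval_ =>
            if irow_.1 ≠ irow.1 ∨ jval_.1 ≠ jval.1 then
              let mrc := if irow_.1 = irow.1 then
                           (if oLT jval_.2 mrc.1 then (some jval_.2, mrc.2) else mrc)
                         else mrc
              let mrc := if jval_.1 = jval.1 then
                           (if oLT jval_.2 mrc.2 then (mrc.1, some jval_.2) else mrc)
                         else mrc
              mrc
            else mrc) mrc) ((none : Option Int), (none : Option Int))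
        let d := eAdd mrc.1 mrc.2
        if eGT d acc.2.2 then (irow.1, jval.1, d) else acc
      else acc)
    = (if jval.2 = 0 then
        let d := eAdd
          (sel (PySem.List.pyGetD (mtx.map (fun row => twoSmallest (PySem.List.enumerate row 0)))
            irow.1 (none, -1, none)) jval.1)
          (sel (PySem.List.pyGetD ((PySem.List.pyRange 0
              (mtx.foldl (fun m row => max m (row.length : Int)) 0) 1).map (fun j =>
            twoSmallest ((PySem.List.enumerate mtx 0).filterMap (fun p =>
              (PySem.List.pyGet? p.2 j).map (fun v => (p.1, v)))))) jval.1 (none, -1, none))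
            irow.1)
        if eGT d acc.2.2 then (irow.1, jval.1, d) else acc
      else acc) := by
  by_cases hz : jval.2 = 0
  · rw [if_pos hz, if_pos hz]
    obtain ⟨k, hk, hik⟩ := (PySem.List.mem_enumerate_iff mtx 0 irow).1 hirow
    obtain ⟨k2, hk2, hjk⟩ := (PySem.List.mem_enumerate_iff irow.2 0 jval).1 hjval
    have hrow2 : irow.2 = mtx[k] := by rw [hik]
    have hi1 : irow.1 = (k : Int) := by rw [hik]; simp
    have hj1 : jval.1 = (k2 : Int) := by rw [hjk]; simp
    have hj0 : 0 ≤ jval.1 := by omega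
    have hmtx : mtx = mtx.take k ++ irow.2 :: mtx.drop (k + 1) := by
      rw [hrow2, ← List.drop_eq_getElem_cons hk]
      exact (List.take_append_drop k mtx).symm
    have hlen : irow.1 = ((mtx.take k).length : Int) := by
      rw [List.length_take, Nat.min_eq_left (le_of_lt hk)]; omega
    rw [inner_eq mtx irow.1 jval.1 hj0 (mtx.take k) (mtx.drop (k + 1)) irow.2 hmtx hlen]
    have heqrow : PySem.List.pyGetD
        (mtx.map (fun row => twoSmallest (PySem.List.enumerate row 0))) irow.1
        ((none : Option Int), (-1 : Int), (none : Option Int))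
        = twoSmallest (PySem.List.enumerate irow.2 0) := by
      rw [hi1, hrow2]
      exact pyGetD_map_nat mtx _ k hk _
    have hjlt : jval.1 < mtx.foldl (fun m row => max m (row.length : Int)) 0 := by
      have h1 : (irow.2.length : Int) ≤ _ := len_le_maxw mtx irow.2 (hrow2 ▸ List.getElem_mem hk)
      omega
    have heqcol : PySem.List.pyGetD ((PySem.List.pyRange 0
          (mtx.foldl (fun m row => max m (row.length : Int)) 0) 1).map (fun j =>
        twoSmallest ((PySem.List.enumerate mtx 0).filterMap (fun p =>
          (PySem.List.pyGet? p.2 j).map (fun v => (p.1, v)))))) jval.1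
        ((none : Option Int), (-1 : Int), (none : Option Int))
        = twoSmallest (colPairs mtx jval.1) := by
      rw [PySem.List.pyGetD_map_pyRange_of_nonneg _ _ _ _ hj0 hjlt]
      rfl
    rw [heqrow, heqcol, (ts_spec _ (nodup_keys_enum irow.2)).1 jval.1,
      (ts_spec _ (nodup_keys_colPairs mtx jval.1)).1 irow.1]
  · rw [if_neg hz, if_neg hz]

theorem main_fold_eq (mtx : List (List Int)) :
    (PySem.List.enumerate mtx 0).foldl (fun (acc : Int × Int × Option Int) irow =>
      (PySem.List.enumerate irow.2 0).foldl (fun acc jval =>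
        if jval.2 = 0 then
          let mrc := (PySem.List.enumerate mtx 0).foldl (fun (mrc : Option Int × Option Int) irow_ =>
            (PySem.List.enumerate irow_.2 0).foldl (fun mrc jval_ =>
              if irow_.1 ≠ irow.1 ∨ jval_.1 ≠ jval.1 then
                let mrc := if irow_.1 = irow.1 then
                             (if oLT jval_.2 mrc.1 then (some jval_.2, mrc.2) else mrc)
                           else mrc
                let mrc := if jval_.1 = jval.1 then
                             (if oLT jval_.2 mrc.2 then (mrc.1, some jval_.2) else mrc)
                           else mrc
                mrc
              else mrc) mrc) ((none : Option Int), (none : Option Int))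
          let d := eAdd mrc.1 mrc.2
          if eGT d acc.2.2 then (irow.1, jval.1, d) else acc
        else acc) acc) ((-1 : Int), (-1 : Int), (some (-1) : Option Int))
    = (PySem.List.enumerate mtx 0).foldl (fun (acc : Int × Int × Option Int) irow =>
      (PySem.List.enumerate irow.2 0).foldl (fun acc jval =>
        if jval.2 = 0 then
          let d := eAdd
            (sel (PySem.List.pyGetD (mtx.map (fun row => twoSmallest (PySem.List.enumerate row 0)))
              irow.1 (none, -1, none)) jval.1)
            (sel (PySem.List.pyGetD ((PySem.List.pyRange 0
                (mtx.foldl (fun m row => max m (row.length : Int)) 0) 1).map (fun j =>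
              twoSmallest ((PySem.List.enumerate mtx 0).filterMap (fun p =>
                (PySem.List.pyGet? p.2 j).map (fun v => (p.1, v)))))) jval.1 (none, -1, none))
              irow.1)
          if eGT d acc.2.2 then (irow.1, jval.1, d) else acc
        else acc) acc) ((-1 : Int), (-1 : Int), (some (-1) : Option Int)) := by
  apply PySem.List.foldl_congr_mem
  intro acc irow hirow
  apply PySem.List.foldl_congr_mem
  intro acc2 jval hjval
  exact step2_eq mtx irow jval hirow hjval acc2

-- ===== VERDICT (by name: the statement is the Claim_ definition above) =====
theorem get_edge_max_opt_exl_cost_spec : Claim_equal_get_edge_max_opt_exl_cost := by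
  intro mtx _
  show get_edge_max_opt_exl_cost mtx = get_edge_max_opt_exl_cost_alt mtx
  exact congrArg (fun r => (r.1, r.2.1)) (main_fold_eq mtx)
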